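-- pv_equiv track=rewrite | github.com/baojie/shiji-kb | kg/entities/scripts/build_entity_index.py | _person_active_range
-- ===== SOURCE A (Python) =====
-- def _person_active_range(people_list, lifespans):
--     """根据事件人物列表，计算人物生存期的交集区间
--
--     Returns: (latest_birth, earliest_death) 或 (None, None)
--     """
--     ranges = []
--     for person in people_list:
--         if person in lifespans:
--             info = lifespans[person]
--             ranges.append((info['birth'], info['death']))
--     if not ranges:
--         return None, None
--     latest_birth = max(b for b, d in ranges)
--     earliest_death = min(d for b, d in ranges)
--     if latest_birth <= earliest_death:
--         return latest_birth, earliest_death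
--     return None, None
-- ===== SOURCE B (Python) =====
-- def _person_active_range(people_list, lifespans):
--     """Inverted traversal: iterate the lifespans dict once against a set of the
--     listed people, narrowing a single intersection interval and bailing out as
--     soon as it becomes empty."""
--     people = set(people_list)
--     lo = hi = None
--     for key, info in lifespans.items():
--         if key not in people:
--             continue
--         b, d = info['birth'], info['death']
--         if lo is None:
--             lo, hi = b, d
--         else:
--             lo, hi = max(lo, b), min(hi, d)
--         if lo > hi:
--             return None, None
--     if lo is None:
--         return None, None
--     return lo, hi
-- ===== Notes on version B (the rewrite author's own statement) =====
-- stated objective: alternative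
-- what changed: B inverts the traversal: it builds a set of the listed people once, iterates over the lifespans dict's items instead of people_list, narrows a single running intersection interval, and returns early as soon as the intersection is empty, instead of buffering all ranges in a list and taking max/min afterwards.
import Mathlib
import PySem

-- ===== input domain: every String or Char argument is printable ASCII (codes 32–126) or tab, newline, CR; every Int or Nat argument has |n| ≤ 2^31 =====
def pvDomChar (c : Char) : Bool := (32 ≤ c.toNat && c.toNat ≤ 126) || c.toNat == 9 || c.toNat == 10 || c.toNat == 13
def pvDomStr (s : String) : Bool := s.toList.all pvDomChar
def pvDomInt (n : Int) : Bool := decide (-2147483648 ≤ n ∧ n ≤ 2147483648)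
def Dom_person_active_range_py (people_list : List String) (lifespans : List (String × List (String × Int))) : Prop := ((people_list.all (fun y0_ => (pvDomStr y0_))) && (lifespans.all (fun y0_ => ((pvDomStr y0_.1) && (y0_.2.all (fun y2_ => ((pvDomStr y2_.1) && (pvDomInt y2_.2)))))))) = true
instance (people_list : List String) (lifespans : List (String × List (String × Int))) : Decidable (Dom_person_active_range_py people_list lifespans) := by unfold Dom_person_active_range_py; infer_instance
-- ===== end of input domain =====

-- B inverts the traversal: one pass over the dict's items against a set of the listed people,
-- narrowing a running intersection interval with an early exit (objective: alternative, same O(n)).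

-- ===== PORT A =====
-- (info['birth'], info['death']) of a lifespan record (default only reachable outside Pre_)
def pvPair (info : List (String × Int)) : Int × Int :=
  ((PySem.Dict.mk info).getD "birth" 0, (PySem.Dict.mk info).getD "death" 0)

def person_active_range_py (people_list : List String) (lifespans : List (String × List (String × Int))) : Option Int × Option Int :=
  let ranges : List (Int × Int) := people_list.foldl (fun acc person =>
    match (PySem.Dict.mk lifespans).get? person with
    | some info => acc ++ [pvPair info]
    | none => acc) []
  if ranges.isEmpty then (none, none)
  else
    match PySem.List.max? (ranges.map (fun bd => bd.1)) (fun y => y),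
          PySem.List.min? (ranges.map (fun bd => bd.2)) (fun y => y) with
    | some latest_birth, some earliest_death =>
        if latest_birth ≤ earliest_death then (some latest_birth, some earliest_death)
        else (none, none)
    | _, _ => (none, none)

-- ===== PORT B =====
-- models `lifespans.items()` under the task's dict convention (lookup = first match):
-- first occurrence of each key, in order; it IS the input list whenever keys are
-- distinct, i.e. on every list that represents a real Python dict.
def pvDictItems : List (String × List (String × Int)) → List (String × List (String × Int))
  | [] => []
  | (k, v) :: rest => (k, v) :: (pvDictItems rest).filter (fun q => !(q.1 == k))

-- the `for key, info in lifespans.items(): …` loop of Source B, with its early `return`;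
-- cur = none models `lo is None`
def pvAltLoop (people : PySem.Set String) : List (String × List (String × Int)) → Option (Int × Int) → Option Int × Option Int
  | [], none => (none, none)
  | [], some (lo, hi) => (some lo, some hi)
  | (k, info) :: rest, cur =>
    if PySem.Set.contains people k then
      let b := (PySem.Dict.mk info).getD "birth" 0
      let d := (PySem.Dict.mk info).getD "death" 0
      match cur with
      | none => if b > d then (none, none) else pvAltLoop people rest (some (b, d))
      | some (lo, hi) =>
          if max lo b > min hi d then (none, none)
          else pvAltLoop people rest (some (max lo b, min hi d))
    else pvAltLoop people rest cur

def person_active_range_py_alt (people_list : List String) (lifespans : List (String × List (String × Int))) : Option Int × Option Int :=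
  pvAltLoop (PySem.Set.ofList people_list) (pvDictItems lifespans) none

-- ===== PRECONDITION & SPEC =====
-- Pre_ excludes inputs where some listed person's lifespan record lacks a 'birth' or 'death'
-- key: there both programs raise KeyError (A after the membership test, B after the set test).
def Pre_person_active_range_py (people_list : List String) (lifespans : List (String × List (String × Int))) : Prop :=
  (people_list.all (fun person =>
    match (PySem.Dict.mk lifespans).get? person with
    | none => true
    | some info => (PySem.Dict.mk info).contains "birth" && (PySem.Dict.mk info).contains "death")) = true
instance (people_list : List String) (lifespans : List (String × List (String × Int))) : Decidable (Pre_person_active_range_py people_list lifespans) := by unfold Pre_person_active_range_py; infer_instance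
def pvWitness_person_active_range_py : List String × (List (String × List (String × Int))) :=
  (["ann", "bob"], [("ann", [("birth", 10), ("death", 60)]), ("bob", [("birth", 20), ("death", 50)])])

def Spec_person_active_range_py (people_list : List String) (lifespans : List (String × List (String × Int))) (out : Option Int × Option Int) : Prop := out = person_active_range_py_alt people_list lifespans
instance (people_list : List String) (lifespans : List (String × List (String × Int))) (out : Option Int × Option Int) : Decidable (Spec_person_active_range_py people_list lifespans out) := by unfold Spec_person_active_range_py; infer_instance

-- ===== CLAIM (what is proved, stated in full; the proofs are below) =====
def Claim_equal_person_active_range_py : Prop := ∀ (people_list : List String) (lifespans : List (String × List (String × Int))), Dom_person_active_range_py people_list lifespans → Pre_person_active_range_py people_list lifespans → Spec_person_active_range_py people_list lifespans (person_active_range_py people_list lifespans)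

-- ===== LEMMAS AND PROOFS =====

-- the pure narrowing step of B's loop and the rendering of its final interval state
def pvStep (cur : Option (Int × Int)) (bd : Int × Int) : Option (Int × Int) :=
  some (match cur with | none => bd | some (lo, hi) => (max lo bd.1, min hi bd.2))
def pvRender : Option (Int × Int) → Option Int × Option Int
  | none => (none, none)
  | some (lo, hi) => if lo > hi then (none, none) else (some lo, some hi)

theorem pvDictItems_mem (ps : List (String × List (String × Int))) (k : String) (v : List (String × Int)) :
    (k, v) ∈ pvDictItems ps ↔ (PySem.Dict.mk ps).get? k = some v := by
  induction ps with
  | nil => simp [pvDictItems, PySem.Dict.get?]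
  | cons p rest ih =>
    obtain ⟨a, b⟩ := p
    rw [PySem.Dict.get?_mk_cons]
    by_cases hk : a = k
    · subst hk
      simp [pvDictItems, eq_comm]
    · rw [if_neg (by simp [hk])]
      simp only [pvDictItems, List.mem_cons, List.mem_filter]
      rw [← ih]
      constructor
      · rintro (h | ⟨h, _⟩)
        · exact absurd (congrArg Prod.fst h).symm hk
        · exact h
      · intro h
        exact Or.inr ⟨h, by simpa using fun he => hk he.symm⟩

-- monotone narrowing: folding further pairs only raises lo and lowers hi
theorem pvFold_mono (qs : List (Int × Int)) : ∀ (lo hi : Int),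
    ∃ lo' hi', List.foldl pvStep (some (lo, hi)) qs = some (lo', hi') ∧ lo ≤ lo' ∧ hi' ≤ hi := by
  induction qs with
  | nil => intro lo hi; exact ⟨lo, hi, rfl, le_refl _, le_refl _⟩
  | cons q t ih =>
    intro lo hi
    obtain ⟨lo', hi', h, h1, h2⟩ := ih (max lo q.1) (min hi q.2)
    exact ⟨lo', hi', by simpa [pvStep] using h, le_trans (le_max_left _ _) h1,
      le_trans h2 (min_le_left _ _)⟩

-- B's early-exit loop equals rendering the full fold over the filtered, paired items
-- (from any reachable state, i.e. any interval state that is nonempty)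
theorem pvAltLoop_eq_fold (people : PySem.Set String) (items : List (String × List (String × Int))) :
    ∀ cur, (∀ lo hi, cur = some (lo, hi) → lo ≤ hi) →
      pvAltLoop people items cur =
        pvRender (List.foldl pvStep cur ((items.filter (fun q => PySem.Set.contains people q.1)).map (fun q => pvPair q.2))) := by
  induction items with
  | nil =>
    rintro (_ | ⟨lo, hi⟩) hv
    · simp [pvAltLoop, pvRender]
    · have := hv lo hi rfl
      simp only [List.filter_nil, List.map_nil, List.foldl_nil, pvAltLoop, pvRender]
      rw [if_neg (by omega)]
  | cons p rest ih =>
    obtain ⟨k, info⟩ := p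
    intro cur hv
    by_cases hc : PySem.Set.contains people k
    · cases cur with
      | none =>
        simp only [pvAltLoop, hc, if_true, List.filter_cons, List.map_cons, List.foldl_cons]
        have hstep : pvStep none (pvPair info) = some (pvPair info) := rfl
        rw [hstep]
        by_cases hgt : (PySem.Dict.mk info).getD "birth" 0 > (PySem.Dict.mk info).getD "death" 0
        · rw [if_pos hgt]
          obtain ⟨lo', hi', h, h1, h2⟩ := pvFold_mono
            ((rest.filter (fun q => PySem.Set.contains people q.1)).map (fun q => pvPair q.2))
            (pvPair info).1 (pvPair info).2
          rw [h]
          have : lo' > hi' := by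
            have hb : (pvPair info).1 = (PySem.Dict.mk info).getD "birth" 0 := rfl
            have hd : (pvPair info).2 = (PySem.Dict.mk info).getD "death" 0 := rfl
            omega
          simp only [pvRender, if_pos this]
        · rw [if_neg hgt]
          refine ih (some (pvPair info)) ?_
          rintro lo hi h
          obtain ⟨h1, h2⟩ := Prod.mk.injEq .. ▸ Option.some.inj h
          simp only [← h1, ← h2]
          omega
      | some lohi =>
        obtain ⟨lo, hi⟩ := lohi
        simp only [pvAltLoop, hc, if_true, List.filter_cons, List.map_cons, List.foldl_cons]
        have hstep : pvStep (some (lo, hi)) (pvPair info) =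
            some (max lo (pvPair info).1, min hi (pvPair info).2) := rfl
        rw [hstep]
        by_cases hgt : max lo ((PySem.Dict.mk info).getD "birth" 0) > min hi ((PySem.Dict.mk info).getD "death" 0)
        · rw [if_pos hgt]
          obtain ⟨lo', hi', h, h1, h2⟩ := pvFold_mono
            ((rest.filter (fun q => PySem.Set.contains people q.1)).map (fun q => pvPair q.2))
            (max lo (pvPair info).1) (min hi (pvPair info).2)
          rw [h]
          have hb : (pvPair info).1 = (PySem.Dict.mk info).getD "birth" 0 := rfl
          have hd : (pvPair info).2 = (PySem.Dict.mk info).getD "death" 0 := rfl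
          have : lo' > hi' := by omega
          simp only [pvRender, if_pos this]
        · rw [if_neg hgt]
          refine ih (some (max lo (pvPair info).1, min hi (pvPair info).2)) ?_
          rintro lo'' hi'' h
          obtain ⟨h1, h2⟩ := Prod.mk.injEq .. ▸ Option.some.inj h
          have hb : (pvPair info).1 = (PySem.Dict.mk info).getD "birth" 0 := rfl
          have hd : (pvPair info).2 = (PySem.Dict.mk info).getD "death" 0 := rfl
          omega
    · have hc' : PySem.Set.contains people k = false := by simpa using hc
      simp only [pvAltLoop, hc', if_false, List.filter_cons, Bool.false_eq_true]
      exact ih cur hv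

-- the full fold is the running max of firsts / min of seconds
theorem pvFold_run (qs : List (Int × Int)) : ∀ (lo hi : Int),
    List.foldl pvStep (some (lo, hi)) qs =
      some (List.foldl max lo (qs.map Prod.fst), List.foldl min hi (qs.map Prod.snd)) := by
  induction qs with
  | nil => intro lo hi; rfl
  | cons q t ih => intro lo hi; simpa [pvStep] using ih (max lo q.1) (min hi q.2)

theorem pvFold_none (q : Int × Int) (qs : List (Int × Int)) :
    List.foldl pvStep none (q :: qs) =
      some (List.foldl max q.1 (qs.map Prod.fst), List.foldl min q.2 (qs.map Prod.snd)) := by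
  simpa [pvStep] using pvFold_run qs q.1 q.2

-- equal membership of Int lists gives equal max? (and min?) under the identity key
theorem pvMax?_congr (xs ys : List Int) (h : ∀ a, a ∈ xs ↔ a ∈ ys) :
    PySem.List.max? xs (fun y => y) = PySem.List.max? ys (fun y => y) := by
  cases hx : PySem.List.max? xs (fun y => y) with
  | none =>
    have hxe : xs = [] := (PySem.List.max?_eq_none_iff _ _).mp hx
    have hye : ys = [] := List.eq_nil_iff_forall_not_mem.mpr (fun a ha =>
      by simp [hxe] at h; exact (h a) ha)
    simp [hye, PySem.List.max?]
  | some m =>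
    have hmx : m ∈ xs := PySem.List.max?_mem hx
    cases hy : PySem.List.max? ys (fun y => y) with
    | none =>
      have hye : ys = [] := (PySem.List.max?_eq_none_iff _ _).mp hy
      exact absurd ((h m).mp hmx) (by simp [hye])
    | some m' =>
      have hmy : m' ∈ ys := PySem.List.max?_mem hy
      have h1 : m ≤ m' := PySem.List.max?_isMax hy m ((h m).mp hmx)
      have h2 : m' ≤ m := PySem.List.max?_isMax hx m' ((h m').mpr hmy)
      simp [le_antisymm h1 h2]

theorem pvMin?_congr (xs ys : List Int) (h : ∀ a, a ∈ xs ↔ a ∈ ys) :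
    PySem.List.min? xs (fun y => y) = PySem.List.min? ys (fun y => y) := by
  cases hx : PySem.List.min? xs (fun y => y) with
  | none =>
    have hxe : xs = [] := (PySem.List.min?_eq_none_iff _ _).mp hx
    have hye : ys = [] := List.eq_nil_iff_forall_not_mem.mpr (fun a ha =>
      by simp [hxe] at h; exact (h a) ha)
    simp [hye, PySem.List.min?]
  | some m =>
    have hmx : m ∈ xs := PySem.List.min?_mem hx
    cases hy : PySem.List.min? ys (fun y => y) with
    | none =>
      have hye : ys = [] := (PySem.List.min?_eq_none_iff _ _).mp hy
      exact absurd ((h m).mp hmx) (by simp [hye])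
    | some m' =>
      have hmy : m' ∈ ys := PySem.List.min?_mem hy
      have h1 : m' ≤ m := PySem.List.min?_isMin hy m ((h m).mp hmx)
      have h2 : m ≤ m' := PySem.List.min?_isMin hx m' ((h m').mpr hmy)
      simp [le_antisymm h2 h1]

-- membership in A's buffered ranges list
theorem pvRanges_mem (people_list : List String) (lifespans : List (String × List (String × Int))) (x : Int × Int) :
    x ∈ people_list.foldl (fun acc person =>
        match (PySem.Dict.mk lifespans).get? person with
        | some info => acc ++ [pvPair info]
        | none => acc) [] ↔
      ∃ p ∈ people_list, ∃ info, (PySem.Dict.mk lifespans).get? p = some info ∧ x = pvPair info := by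
  have key : ∀ (ps : List String) (acc : List (Int × Int)),
      x ∈ ps.foldl (fun acc person =>
        match (PySem.Dict.mk lifespans).get? person with
        | some info => acc ++ [pvPair info]
        | none => acc) acc ↔
      x ∈ acc ∨ ∃ p ∈ ps, ∃ info, (PySem.Dict.mk lifespans).get? p = some info ∧ x = pvPair info := by
    intro ps
    induction ps with
    | nil => intro acc; simp
    | cons p rest ih =>
      intro acc
      simp only [List.foldl_cons]
      cases hget : (PySem.Dict.mk lifespans).get? p with
      | none =>
        rw [ih acc]
        constructor
        · rintro (h | h)
          · exact Or.inl h
          · exact Or.inr (by obtain ⟨q, hq, h⟩ := h; exact ⟨q, List.mem_cons_of_mem _ hq, h⟩)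
        · rintro (h | ⟨q, hq, info, hqi, hx⟩)
          · exact Or.inl h
          · rcases List.mem_cons.mp hq with rfl | hq
            · exact absurd hqi (by simp [hget])
            · exact Or.inr ⟨q, hq, info, hqi, hx⟩
      | some info =>
        rw [ih (acc ++ [pvPair info])]
        constructor
        · rintro (h | h)
          · rcases List.mem_append.mp h with h | h
            · exact Or.inl h
            · exact Or.inr ⟨p, List.mem_cons_self, info, hget, by simpa using h⟩
          · exact Or.inr (by obtain ⟨q, hq, h⟩ := h; exact ⟨q, List.mem_cons_of_mem _ hq, h⟩)
        · rintro (h | ⟨q, hq, info', hqi, hx⟩)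
          · exact Or.inl (List.mem_append.mpr (Or.inl h))
          · rcases List.mem_cons.mp hq with rfl | hq
            · refine Or.inl (List.mem_append.mpr (Or.inr ?_))
              rw [hget] at hqi
              simp [hx, Option.some.inj hqi]
            · exact Or.inr ⟨q, hq, info', hqi, hx⟩
  simpa using key people_list []

-- membership in B's filtered, paired items list
theorem pvQ_mem (people_list : List String) (lifespans : List (String × List (String × Int))) (x : Int × Int) :
    x ∈ ((pvDictItems lifespans).filter (fun q => PySem.Set.contains (PySem.Set.ofList people_list) q.1)).map (fun q => pvPair q.2) ↔
      ∃ p ∈ people_list, ∃ info, (PySem.Dict.mk lifespans).get? p = some info ∧ x = pvPair info := by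
  simp only [List.mem_map, List.mem_filter]
  constructor
  · rintro ⟨⟨k, info⟩, ⟨hmem, hcont⟩, hx⟩
    refine ⟨k, ?_, info, (pvDictItems_mem lifespans k info).mp hmem, hx.symm⟩
    exact (PySem.Set.mem_ofList people_list k).mp ((PySem.Set.contains_iff _ _).mp hcont)
  · rintro ⟨p, hp, info, hqi, hx⟩
    refine ⟨(p, info), ⟨(pvDictItems_mem lifespans p info).mpr hqi, ?_⟩, hx.symm⟩
    exact (PySem.Set.contains_iff _ _).mpr ((PySem.Set.mem_ofList people_list p).mpr hp)

-- ===== VERDICT (by name: the statement is the Claim_ definition above) =====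
theorem person_active_range_py_spec : Claim_equal_person_active_range_py := by
  intro people_list lifespans _ _
  show person_active_range_py people_list lifespans = person_active_range_py_alt people_list lifespans
  unfold person_active_range_py person_active_range_py_alt
  rw [pvAltLoop_eq_fold _ _ none (by simp)]
  set R := people_list.foldl (fun acc person =>
      match (PySem.Dict.mk lifespans).get? person with
      | some info => acc ++ [pvPair info]
      | none => acc) [] with hR
  set Q := ((pvDictItems lifespans).filter (fun q => PySem.Set.contains (PySem.Set.ofList people_list) q.1)).map (fun q => pvPair q.2) with hQ
  have hmem : ∀ x, x ∈ R ↔ x ∈ Q := fun x =>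
    (pvRanges_mem people_list lifespans x).trans (pvQ_mem people_list lifespans x).symm
  clear_value R Q
  by_cases hR0 : R = []
  · have hQ0 : Q = [] := List.eq_nil_iff_forall_not_mem.mpr
      (fun a ha => List.eq_nil_iff_forall_not_mem.mp hR0 a ((hmem a).mpr ha))
    simp [hR0, hQ0, pvRender]
  · have hQ0 : Q ≠ [] := fun hq => hR0 (List.eq_nil_iff_forall_not_mem.mpr
      (fun a ha => by rw [hq] at hmem; exact absurd ((hmem a).mp ha) (by simp)))
    obtain ⟨q, qs, rfl⟩ := List.exists_cons_of_ne_nil hQ0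
    rw [pvFold_none]
    have hmmap : ∀ a : Int, a ∈ R.map (fun bd => bd.1) ↔ a ∈ (q :: qs).map (fun bd : Int × Int => bd.1) := by
      intro a
      simp only [List.mem_map]
      exact ⟨fun ⟨x, hx, he⟩ => ⟨x, (hmem x).mp hx, he⟩, fun ⟨x, hx, he⟩ => ⟨x, (hmem x).mpr hx, he⟩⟩
    have hmmap2 : ∀ a : Int, a ∈ R.map (fun bd => bd.2) ↔ a ∈ (q :: qs).map (fun bd : Int × Int => bd.2) := by
      intro a
      simp only [List.mem_map]
      exact ⟨fun ⟨x, hx, he⟩ => ⟨x, (hmem x).mp hx, he⟩, fun ⟨x, hx, he⟩ => ⟨x, (hmem x).mpr hx, he⟩⟩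
    have hmax : PySem.List.max? (R.map (fun bd => bd.1)) (fun y => y) =
        some (List.foldl max q.1 (qs.map Prod.fst)) := by
      rw [pvMax?_congr _ _ hmmap]
      simpa using PySem.List.max?_id_cons q.1 (qs.map Prod.fst)
    have hmin : PySem.List.min? (R.map (fun bd => bd.2)) (fun y => y) =
        some (List.foldl min q.2 (qs.map Prod.snd)) := by
      rw [pvMin?_congr _ _ hmmap2]
      simpa using PySem.List.min?_id_cons q.2 (qs.map Prod.snd)
    rw [if_neg (by simpa [List.isEmpty_iff] using hR0), hmax, hmin]
    simp only [pvRender]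
    by_cases hle : List.foldl max q.1 (qs.map Prod.fst) ≤ List.foldl min q.2 (qs.map Prod.snd)
    · rw [if_pos hle, if_neg (by omega)]
    · rw [if_neg hle, if_pos (by omega)]
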